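-- pv_equiv track=rewrite | github.com/RhiannonMichelmore/aoc2020 | 24/2.py | end_point
-- ===== SOURCE A (Python) =====
-- def end_point(path):
--     adds_even = {'nw':(-1,1),'ne':(0,1),'w':(-1,0),'e':(1,0),'sw':(-1,-1),'se':(0,-1)}
--     adds_odd = {'nw':(0,1),'ne':(1,1),'w':(-1,0),'e':(1,0),'sw':(0,-1),'se':(1,-1)}
--     current = (0,0)
--     for p in path:
--         if current[1] % 2 == 0:
--             adds = adds_even
--         else:
--             adds = adds_odd
--         current = (current[0] + adds[p][0], current[1] + adds[p][1])
--     return current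
-- ===== SOURCE B (Python) =====
-- DELTAS = {'e': (1, 0), 'w': (-1, 0), 'ne': (0, 1), 'nw': (-1, 1),
--           'se': (1, -1), 'sw': (0, -1)}
--
-- def end_point(path):
--     # Axial hex coordinates: one parity-free delta table, convert at the end.
--     q, r = 0, 0
--     for p in path:
--         dq, dr = DELTAS[p]
--         q += dq
--         r += dr
--     return (q + r // 2, r)
-- ===== Notes on version B (the rewrite author's own statement) =====
-- stated objective: simpler
-- what changed: B walks in parity-free axial hex coordinates with a single constant delta table and converts back to A's offset coordinates once at the end (q + r//2, r), eliminating A's two parity-dependent delta dicts and the per-step parity branch.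
import Mathlib
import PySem

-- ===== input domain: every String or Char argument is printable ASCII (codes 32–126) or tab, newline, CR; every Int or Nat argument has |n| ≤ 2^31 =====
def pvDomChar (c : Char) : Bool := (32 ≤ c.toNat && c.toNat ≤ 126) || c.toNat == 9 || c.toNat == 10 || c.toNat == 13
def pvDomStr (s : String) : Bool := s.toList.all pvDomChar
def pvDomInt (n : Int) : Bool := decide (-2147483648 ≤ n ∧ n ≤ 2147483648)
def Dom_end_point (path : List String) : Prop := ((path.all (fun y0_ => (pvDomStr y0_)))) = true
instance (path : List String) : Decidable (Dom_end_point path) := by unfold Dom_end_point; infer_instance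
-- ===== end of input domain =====

-- B replaces A's two parity-dependent offset delta tables by one parity-free axial table
-- plus a single final conversion (q + r//2, r); objective: simpler.
-- ===== PORT A =====
def pvAddsEven : PySem.Dict String (Int × Int) :=
  PySem.Dict.ofList [("nw", (-1, 1)), ("ne", (0, 1)), ("w", (-1, 0)),
                     ("e", (1, 0)), ("sw", (-1, -1)), ("se", (0, -1))]

def pvAddsOdd : PySem.Dict String (Int × Int) :=
  PySem.Dict.ofList [("nw", (0, 1)), ("ne", (1, 1)), ("w", (-1, 0)),
                     ("e", (1, 0)), ("sw", (0, -1)), ("se", (1, -1))]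

-- the for-loop of A; `none` = KeyError on an unknown direction (excluded by Pre_)
def pvLoopA : List String → Option (Int × Int) → Option (Int × Int)
  | [], cur => cur
  | p :: rest, cur =>
      pvLoopA rest (cur.bind fun c =>
        (PySem.Dict.get? (if PySem.Int.mod c.2 2 = 0 then pvAddsEven else pvAddsOdd) p).map
          fun d => (c.1 + d.1, c.2 + d.2))

def end_point (path : List String) : Int × Int :=
  (pvLoopA path (some (0, 0))).getD (0, 0)

-- ===== PORT B =====
def pvDeltas : PySem.Dict String (Int × Int) :=
  PySem.Dict.ofList [("e", (1, 0)), ("w", (-1, 0)), ("ne", (0, 1)),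
                     ("nw", (-1, 1)), ("se", (1, -1)), ("sw", (0, -1))]

-- the for-loop of B over axial coordinates; `none` = KeyError (excluded by Pre_)
def pvLoopB : List String → Option (Int × Int) → Option (Int × Int)
  | [], cur => cur
  | p :: rest, cur =>
      pvLoopB rest (cur.bind fun c =>
        (PySem.Dict.get? pvDeltas p).map fun d => (c.1 + d.1, c.2 + d.2))

def end_point_alt (path : List String) : Int × Int :=
  match pvLoopB path (some (0, 0)) with
  | some (q, r) => (q + PySem.Int.floordiv r 2, r)
  | none => (0, 0)

-- ===== PRECONDITION & SPEC =====
-- Pre_ excludes exactly the paths containing an unknown direction string, on which A raises KeyError.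
def Pre_end_point (path : List String) : Prop :=
  ∀ s ∈ path, s = "nw" ∨ s = "ne" ∨ s = "w" ∨ s = "e" ∨ s = "sw" ∨ s = "se"
instance (path : List String) : Decidable (Pre_end_point path) := by
  unfold Pre_end_point; infer_instance

def pvWitness_end_point : List String := ["e", "ne", "w", "sw"]

def Spec_end_point (path : List String) (out : Int × Int) : Prop := out = end_point_alt path
instance (path : List String) (out : Int × Int) : Decidable (Spec_end_point path out) := by
  unfold Spec_end_point; infer_instance

-- ===== CLAIM (what is proved, stated in full; the proofs are below) =====
def Claim_equal_end_point : Prop :=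
  ∀ (path : List String), Dom_end_point path → Pre_end_point path →
    Spec_end_point path (end_point path)

-- ===== LEMMAS AND PROOFS =====
-- invariant: A's offset state is the conversion (q + r//2, r) of B's axial state
theorem pvLoop_rel : ∀ (path : List String), Pre_end_point path → ∀ (q r : Int),
    pvLoopA path (some (q + PySem.Int.floordiv r 2, r)) =
      (pvLoopB path (some (q, r))).map
        (fun c => (c.1 + PySem.Int.floordiv c.2 2, c.2)) := by
  intro path
  induction path with
  | nil => intro _ q r; simp [pvLoopA, pvLoopB]
  | cons p rest ih =>
    intro hpre q r
    have hp := hpre p (by simp)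
    have hrest : Pre_end_point rest := fun s hs => hpre s (List.mem_cons_of_mem _ hs)
    have key : ∀ a b a' b' : Int, a = a' + PySem.Int.floordiv b' 2 → b = b' →
        pvLoopA rest (some (a, b)) =
          (pvLoopB rest (some (a', b'))).map
            (fun c => (c.1 + PySem.Int.floordiv c.2 2, c.2)) := by
      rintro a b a' b' rfl rfl; exact ih hrest _ _
    have hm : PySem.Int.mod r 2 = r % 2 := PySem.Int.mod_eq_emod_of_pos (by omega)
    have hfd : ∀ x : Int, PySem.Int.floordiv x 2 = x / 2 :=
      fun x => PySem.Int.floordiv_eq_ediv_of_pos (by omega)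
    have g0nw : PySem.Dict.get? pvAddsEven "nw" = some ((-1:Int),(1:Int)) := by decide
    have g0ne : PySem.Dict.get? pvAddsEven "ne" = some ((0:Int),(1:Int)) := by decide
    have g0w : PySem.Dict.get? pvAddsEven "w" = some ((-1:Int),(0:Int)) := by decide
    have g0e : PySem.Dict.get? pvAddsEven "e" = some ((1:Int),(0:Int)) := by decide
    have g0sw : PySem.Dict.get? pvAddsEven "sw" = some ((-1:Int),(-1:Int)) := by decide
    have g0se : PySem.Dict.get? pvAddsEven "se" = some ((0:Int),(-1:Int)) := by decide
    have g1nw : PySem.Dict.get? pvAddsOdd "nw" = some ((0:Int),(1:Int)) := by decide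
    have g1ne : PySem.Dict.get? pvAddsOdd "ne" = some ((1:Int),(1:Int)) := by decide
    have g1w : PySem.Dict.get? pvAddsOdd "w" = some ((-1:Int),(0:Int)) := by decide
    have g1e : PySem.Dict.get? pvAddsOdd "e" = some ((1:Int),(0:Int)) := by decide
    have g1sw : PySem.Dict.get? pvAddsOdd "sw" = some ((0:Int),(-1:Int)) := by decide
    have g1se : PySem.Dict.get? pvAddsOdd "se" = some ((1:Int),(-1:Int)) := by decide
    have g2nw : PySem.Dict.get? pvDeltas "nw" = some ((-1:Int),(1:Int)) := by decide
    have g2ne : PySem.Dict.get? pvDeltas "ne" = some ((0:Int),(1:Int)) := by decide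
    have g2w : PySem.Dict.get? pvDeltas "w" = some ((-1:Int),(0:Int)) := by decide
    have g2e : PySem.Dict.get? pvDeltas "e" = some ((1:Int),(0:Int)) := by decide
    have g2sw : PySem.Dict.get? pvDeltas "sw" = some ((0:Int),(-1:Int)) := by decide
    have g2se : PySem.Dict.get? pvDeltas "se" = some ((1:Int),(-1:Int)) := by decide
    rcases hp with h | h | h | h | h | h <;> subst h <;>
      by_cases hpar : PySem.Int.mod r 2 = 0 <;>
      rw [hm] at hpar <;>
      simp only [pvLoopA, pvLoopB, hm, hpar, if_true, if_false, ite_true, ite_false,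
        g0nw, g0ne, g0w, g0e, g0sw, g0se, g1nw, g1ne, g1w, g1e, g1sw, g1se, g2nw, g2ne, g2w, g2e, g2sw, g2se, Option.bind_some, Option.map_some] <;>
      (refine key _ _ _ _ ?_ rfl; simp only [hfd]; omega)

-- ===== VERDICT (by name: the statement is the Claim_ definition above) =====
theorem end_point_spec : Claim_equal_end_point := by
  intro path _ hpre
  unfold Spec_end_point end_point end_point_alt
  have h := pvLoop_rel path hpre 0 0
  have h0 : PySem.Int.floordiv (0 : Int) 2 = 0 := by decide
  rw [h0] at h
  simp only [add_zero] at h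
  rw [h]
  cases hB : pvLoopB path (some (0, 0)) with
  | none => simp
  | some c => cases c; simp
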